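-- pv_equiv track=rewrite | github.com/coollabsio/coolify | templates/Epicyon/epicyon-data/pgp.py | extract_pgp_public_key
-- ===== SOURCE A (Python) =====
-- def extract_pgp_public_key(content: str) -> str:
--     """Returns the PGP key from the given text
--     """
--     start_block = '--BEGIN PGP PUBLIC KEY BLOCK--'
--     end_block = '--END PGP PUBLIC KEY BLOCK--'
--     if start_block not in content:
--         return None
--     if end_block not in content:
--         return None
--     if '\n' not in content:
--         return None
--     lines_list = content.split('\n')
--     extracting = False
--     public_key = ''
--     for line in lines_list:
--         if not extracting:
--             if start_block in line:
--                 extracting = True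
--         else:
--             if end_block in line:
--                 public_key += line
--                 break
--         if extracting:
--             public_key += line + '\n'
--     return public_key
-- ===== SOURCE B (Python) =====
-- def extract_pgp_public_key(content: str) -> str:
--     """Returns the PGP key from the given text"""
--     start_block = '--BEGIN PGP PUBLIC KEY BLOCK--'
--     end_block = '--END PGP PUBLIC KEY BLOCK--'
--     if start_block not in content or end_block not in content or '\n' not in content:
--         return None
--     lines = content.split('\n')
--     i = next(k for k, ln in enumerate(lines) if start_block in ln)
--     j = next((k for k in range(i + 1, len(lines)) if end_block in lines[k]), None)
--     if j is None:
--         return None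
--     return '\n'.join(lines[i:j + 1])
-- ===== Notes on version B (the rewrite author's own statement) =====
-- stated objective: simpler
-- what changed: Replaces A's boolean-flag accumulate-and-break pass with explicit boundary location (index of the first start-marker line, then of the first end-marker line after it) followed by one newline-join over the slice between them.
-- intended difference: On inputs that contain both markers and a line break but where no line after the first start-marker line contains the end marker (the end marker appears only at or before the start line), A returns the entire unterminated tail from the start line with trailing line breaks, while B returns None because no complete key block exists; None is the intended result for text without a terminated block. — e.g. on extract_pgp_public_key("--END PGP PUBLIC KEY BLOCK--\n--BEGIN PGP PUBLIC KEY BLOCK--"): A returns some "--BEGIN PGP PUBLIC KEY BLOCK--\n", B returns none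
import Mathlib
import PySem

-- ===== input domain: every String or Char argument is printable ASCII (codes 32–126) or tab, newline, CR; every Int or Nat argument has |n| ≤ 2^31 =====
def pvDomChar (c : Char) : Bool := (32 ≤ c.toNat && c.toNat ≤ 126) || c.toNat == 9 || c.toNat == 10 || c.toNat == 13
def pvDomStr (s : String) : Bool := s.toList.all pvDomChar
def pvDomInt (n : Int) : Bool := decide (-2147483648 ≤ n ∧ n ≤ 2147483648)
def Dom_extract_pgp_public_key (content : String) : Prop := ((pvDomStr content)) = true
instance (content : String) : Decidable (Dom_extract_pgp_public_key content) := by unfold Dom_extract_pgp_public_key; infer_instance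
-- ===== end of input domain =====

-- B locates the block boundaries (first start-marker line, first end-marker line
-- after it) and joins the slice between them, instead of A's boolean-flag pass;
-- objective: simpler decomposition, same cost. On unterminated blocks (see D_)
-- B returns none where A returns the dangling tail.

-- ===== PORT A =====
-- the for-loop of A: state = (extracting, public_key); break returns immediately
def pvExtractLoop (sb eb : String) : List String → Bool → String → String
  | [], _, acc => acc
  | line :: rest, extracting, acc =>
    if !extracting then
      if PySem.Str.isIn sb line then
        pvExtractLoop sb eb rest true (acc ++ line ++ "\n")   -- extracting just became True: the trailing `if extracting` fires
      else
        pvExtractLoop sb eb rest false acc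
    else
      if PySem.Str.isIn eb line then acc ++ line              -- `public_key += line` then break
      else pvExtractLoop sb eb rest true (acc ++ line ++ "\n")

def extract_pgp_public_key (content : String) : Option String :=
  let start_block := "--BEGIN PGP PUBLIC KEY BLOCK--"
  let end_block := "--END PGP PUBLIC KEY BLOCK--"
  if !(PySem.Str.isIn start_block content) then none
  else if !(PySem.Str.isIn end_block content) then none
  else if !(PySem.Str.isIn "\n" content) then none
  else
    let lines_list := (PySem.Str.split? content "\n").getD []   -- split? is some: the separator "\n" is non-empty
    some (pvExtractLoop start_block end_block lines_list false "")

-- ===== PORT B =====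
def extract_pgp_public_key_alt (content : String) : Option String :=
  let start_block := "--BEGIN PGP PUBLIC KEY BLOCK--"
  let end_block := "--END PGP PUBLIC KEY BLOCK--"
  if !(PySem.Str.isIn start_block content) || !(PySem.Str.isIn end_block content) || !(PySem.Str.isIn "\n" content) then none
  else
    let lines := (PySem.Str.split? content "\n").getD []        -- split? is some: the separator "\n" is non-empty
    let i := (lines.findIdx? (fun ln => PySem.Str.isIn start_block ln)).getD lines.length
      -- `next(k for k, ln in enumerate(lines) if start_block in ln)`: the guard makes it always found
    match (lines.drop (i + 1)).findIdx? (fun ln => PySem.Str.isIn end_block ln) with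
      -- `next((k for k in range(i+1, len(lines)) if end_block in lines[k]), None)`, index relative to i+1
    | none => none
    | some j => some (PySem.Str.join "\n" ((lines.drop i).take (j + 2)))
      -- '\n'.join(lines[i : (i+1+j) + 1]) with 0 ≤ i ported as drop/take

-- ===== PRECONDITION & SPEC =====
-- On inputs containing both markers and a newline but where no line after the first
-- start-marker line contains the end marker, A returns the unterminated tail from the
-- start line with trailing newlines, while B returns none: no complete key block exists,
-- so none is the intended result.
def D_extract_pgp_public_key (content : String) : Prop :=
  PySem.Chars.isIn "--BEGIN PGP PUBLIC KEY BLOCK--".toList content.toList = true ∧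
  PySem.Chars.isIn "--END PGP PUBLIC KEY BLOCK--".toList content.toList = true ∧
  PySem.Chars.isIn ['\n'] content.toList = true ∧
  ∀ ls ∈ ((PySem.Chars.splitOn content.toList ['\n']).dropWhile
      (fun ls => !PySem.Chars.isIn "--BEGIN PGP PUBLIC KEY BLOCK--".toList ls)).tail,
    PySem.Chars.isIn "--END PGP PUBLIC KEY BLOCK--".toList ls = false
instance (content : String) : Decidable (D_extract_pgp_public_key content) := by unfold D_extract_pgp_public_key; infer_instance

def Spec_extract_pgp_public_key (content : String) (out : Option String) : Prop := ¬ D_extract_pgp_public_key content → out = extract_pgp_public_key_alt content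
instance (content : String) (out : Option String) : Decidable (Spec_extract_pgp_public_key content out) := by unfold Spec_extract_pgp_public_key; infer_instance

def pvDiffWitness_extract_pgp_public_key : String :=
  "--END PGP PUBLIC KEY BLOCK--\n--BEGIN PGP PUBLIC KEY BLOCK--"
def pvDiffWitnessOut_extract_pgp_public_key : (Option String) × (Option String) :=
  (some "--BEGIN PGP PUBLIC KEY BLOCK--\n", none)

-- ===== CLAIM (what is proved, stated in full; the proofs are below) =====
def Claim_unchanged_extract_pgp_public_key : Prop := ∀ (content : String), Dom_extract_pgp_public_key content → Spec_extract_pgp_public_key content (extract_pgp_public_key content)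
def Claim_changed_extract_pgp_public_key : Prop := Dom_extract_pgp_public_key (pvDiffWitness_extract_pgp_public_key) ∧ D_extract_pgp_public_key (pvDiffWitness_extract_pgp_public_key) ∧ extract_pgp_public_key (pvDiffWitness_extract_pgp_public_key) = pvDiffWitnessOut_extract_pgp_public_key.1 ∧ extract_pgp_public_key_alt (pvDiffWitness_extract_pgp_public_key) = pvDiffWitnessOut_extract_pgp_public_key.2 ∧ pvDiffWitnessOut_extract_pgp_public_key.1 ≠ pvDiffWitnessOut_extract_pgp_public_key.2
def Claim_exact_extract_pgp_public_key : Prop := ∀ (content : String), Dom_extract_pgp_public_key content → D_extract_pgp_public_key content → extract_pgp_public_key content ≠ extract_pgp_public_key_alt content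

-- ===== LEMMAS AND PROOFS =====

-- ''.join(ln + '\n' for ln in ls): what A's loop accumulates (proof-only helper)
def pvWithNewlines (ls : List String) : String :=
  PySem.Str.join "" (ls.map (fun ln => ln ++ "\n"))

theorem pvWithNewlines_nil : pvWithNewlines [] = "" := by decide

theorem pvJoin_empty_cons (a : String) (l : List String) :
    PySem.Str.join "" (a :: l) = a ++ PySem.Str.join "" l := by
  apply String.toList_inj.mp
  simp only [PySem.Str.toList_join, String.toList_append, List.map]
  cases l <;> simp [PySem.Chars.join, List.intercalate]

theorem pvWithNewlines_cons (a : String) (l : List String) :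
    pvWithNewlines (a :: l) = a ++ "\n" ++ pvWithNewlines l := by
  simp [pvWithNewlines, pvJoin_empty_cons, String.append_assoc]

theorem pvJoinNl_cons (a : String) (l : List String) (h : l ≠ []) :
    PySem.Str.join "\n" (a :: l) = a ++ "\n" ++ PySem.Str.join "\n" l := by
  apply String.toList_inj.mp
  cases l with
  | nil => exact absurd rfl h
  | cons b t =>
    simp only [PySem.Str.toList_join, String.toList_append, List.map]
    simp [PySem.Chars.join, List.intercalate, String.toList]

-- pvWithNewlines over all but the last element, plus the bare last element, is a '\n'-join
theorem pvWithNewlines_append_last (ls : List String) (last : String) :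
    pvWithNewlines ls ++ last = PySem.Str.join "\n" (ls ++ [last]) := by
  induction ls with
  | nil =>
    apply String.toList_inj.mp
    simp [pvWithNewlines_nil, PySem.Str.toList_join, PySem.Chars.join, List.intercalate,
      String.empty_append]
  | cons a t ih =>
    rw [pvWithNewlines_cons, List.cons_append,
      pvJoinNl_cons a (t ++ [last]) (by simp), ← ih]
    simp [String.append_assoc]

theorem pvExtractLoop_true_shift (sb eb : String) (rest : List String) (acc : String) :
    pvExtractLoop sb eb rest true acc = acc ++ pvExtractLoop sb eb rest true "" := by
  induction rest generalizing acc with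
  | nil => simp [pvExtractLoop]
  | cons line rest ih =>
    by_cases h : PySem.Chars.isIn eb.toList line.toList = true
    · simp [pvExtractLoop, h]
    · simp only [Bool.not_eq_true] at h
      have e1 : ∀ a, pvExtractLoop sb eb (line :: rest) true a =
          pvExtractLoop sb eb rest true (a ++ line ++ "\n") := fun a => by
        simp [pvExtractLoop, h]
      rw [e1, e1, ih, ih ("" ++ line ++ "\n")]
      simp [String.append_assoc]

-- the extracting-phase of A's loop, characterised by the first end-marker line
theorem pvExtractLoop_true_eq (sb eb : String) (rest : List String) :
    pvExtractLoop sb eb rest true "" =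
      (match rest.findIdx? (fun ln => PySem.Str.isIn eb ln) with
       | none => pvWithNewlines rest
       | some j => pvWithNewlines (rest.take j) ++ rest.getD j "") := by
  induction rest with
  | nil => simp [pvExtractLoop, pvWithNewlines_nil]
  | cons line rest ih =>
    by_cases h : PySem.Chars.isIn eb.toList line.toList = true
    · simp [pvExtractLoop, h, List.findIdx?_cons, pvWithNewlines_nil, String.empty_append]
    · simp only [Bool.not_eq_true] at h
      rw [pvExtractLoop, if_neg (by simp), if_neg (by simpa using h),
        pvExtractLoop_true_shift, ih, List.findIdx?_cons]
      cases hf : rest.findIdx? (fun ln => PySem.Str.isIn eb ln) with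
      | none => simp [h, pvWithNewlines_cons, String.append_assoc, String.empty_append]
      | some m => simp [h, pvWithNewlines_cons, String.append_assoc, String.empty_append]

-- A's whole loop: locate the first start line i, then the first end line after it
theorem pvExtractLoop_eq_located (sb eb : String) (lines : List String) :
    pvExtractLoop sb eb lines false "" =
      (let i := (lines.findIdx? (fun ln => PySem.Str.isIn sb ln)).getD lines.length
       match (lines.drop (i + 1)).findIdx? (fun ln => PySem.Str.isIn eb ln) with
       | none => pvWithNewlines (lines.drop i)
       | some j => pvWithNewlines ((lines.drop i).take (j + 1)) ++ (lines.drop (i + 1)).getD j "") := by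
  induction lines with
  | nil => simp [pvExtractLoop, pvWithNewlines_nil]
  | cons line rest ih =>
    by_cases h : PySem.Chars.isIn sb.toList line.toList = true
    · rw [pvExtractLoop, if_pos (by simp), if_pos (by simpa using h),
        pvExtractLoop_true_shift, pvExtractLoop_true_eq]
      simp only [List.findIdx?_cons, PySem.Str.isIn_eq, h, ite_true, Option.getD_some,
        List.drop_succ_cons, List.drop_zero]
      cases hf : rest.findIdx? (fun ln => PySem.Chars.isIn eb.toList ln.toList) with
      | none => simp [pvWithNewlines_cons, String.append_assoc, String.empty_append]
      | some m => simp [pvWithNewlines_cons, String.append_assoc, String.empty_append]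
    · simp only [Bool.not_eq_true] at h
      rw [pvExtractLoop, if_pos (by simp), if_neg (by simpa using h), ih]
      simp only [List.findIdx?_cons, PySem.Str.isIn_eq, h, Bool.false_eq_true, ite_false,
        List.length_cons]
      cases hf : rest.findIdx? (fun ln => PySem.Chars.isIn sb.toList ln.toList) with
      | none => simp [List.drop_succ_cons, List.drop_length]
      | some m => simp [List.drop_succ_cons]

-- in the found case, A's accumulated value is B's one-shot '\n'-join of the slice
theorem pvFound_join (L : List String) (j : Nat) (hj : j + 1 < L.length) :
    pvWithNewlines (L.take (j + 1)) ++ (L.drop 1).getD j "" =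
      PySem.Str.join "\n" (L.take (j + 2)) := by
  have hget : (L.drop 1)[j]? = L[j + 1]? := by
    rw [List.getElem?_drop]; congr 1; omega
  have hsome : L[j + 1]? = some (L.getD (j + 1) "") := by
    simp [List.getD, List.getElem?_eq_getElem hj]
  have htake : L.take (j + 2) = L.take (j + 1) ++ [L.getD (j + 1) ""] := by
    rw [List.take_succ, hsome]; rfl
  rw [htake, ← pvWithNewlines_append_last]
  congr 1
  simp only [List.getD]
  rw [hget]

-- the Python-split of content on '\n' always succeeds, and agrees with Chars.splitOn
theorem pvSplit_bridge (content : String) :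
    ∃ L, PySem.Str.split? content "\n" = some L ∧
      L.map String.toList = PySem.Chars.splitOn content.toList ['\n'] := by
  have h := PySem.Str.split?_map content "\n"
  have h2 : PySem.Chars.split? content.toList "\n".toList =
      some (PySem.Chars.splitOn content.toList ['\n']) := by
    simp [PySem.Chars.split?]
  rw [h2] at h
  cases hsp : PySem.Str.split? content "\n" with
  | none => rw [hsp] at h; simp at h
  | some L => rw [hsp] at h; exact ⟨L, rfl, by simpa using h⟩

-- drop past the first p-line = tail of dropWhile-not-p
theorem pvDropTail (p : String → Bool) (lines : List String) :
    lines.drop (((lines.findIdx? p).getD lines.length) + 1) =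
      (lines.dropWhile (fun l => !p l)).tail := by
  induction lines with
  | nil => simp
  | cons a t ih =>
    by_cases h : p a = true
    · simp [List.findIdx?_cons, h, List.dropWhile_cons]
    · simp only [Bool.not_eq_true] at h
      rw [List.findIdx?_cons, List.dropWhile_cons]
      simp only [h, Bool.false_eq_true, ite_false, Bool.not_false, ite_true]
      cases hft : t.findIdx? p with
      | none =>
        rw [hft] at ih
        simp only [hft, Option.map_none, Option.getD_none, List.length_cons]
        simpa using ih
      | some k =>
        rw [hft] at ih
        simpa [hft] using ih

-- D_'s fourth conjunct, in the vocabulary of the ports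
theorem pvD4_iff (content : String) :
    (∀ ls ∈ ((PySem.Chars.splitOn content.toList ['\n']).dropWhile
        (fun ls => !PySem.Chars.isIn "--BEGIN PGP PUBLIC KEY BLOCK--".toList ls)).tail,
      PySem.Chars.isIn "--END PGP PUBLIC KEY BLOCK--".toList ls = false)
    ↔ ((((PySem.Str.split? content "\n").getD []).drop
          ((((PySem.Str.split? content "\n").getD []).findIdx?
            (fun ln => PySem.Str.isIn "--BEGIN PGP PUBLIC KEY BLOCK--" ln)).getD
            ((PySem.Str.split? content "\n").getD []).length + 1)).findIdx?
        (fun ln => PySem.Str.isIn "--END PGP PUBLIC KEY BLOCK--" ln) = none) := by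
  obtain ⟨L, hsome, hmap⟩ := pvSplit_bridge content
  rw [hsome]
  simp only [Option.getD_some]
  rw [← hmap, List.dropWhile_map]
  have hpred : ((fun ls => !PySem.Chars.isIn "--BEGIN PGP PUBLIC KEY BLOCK--".toList ls) ∘ String.toList)
      = (fun l => !(PySem.Str.isIn "--BEGIN PGP PUBLIC KEY BLOCK--" l)) := by
    funext l; simp [PySem.Str.isIn_eq, Function.comp]
  rw [hpred, ← List.map_tail, ← pvDropTail (fun l => PySem.Str.isIn "--BEGIN PGP PUBLIC KEY BLOCK--" l) L]
  constructor
  · intro h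
    rw [List.findIdx?_eq_none_iff]
    intro l hl
    have := h l.toList (List.mem_map_of_mem hl)
    simpa [PySem.Str.isIn_eq] using this
  · intro h ls hls
    obtain ⟨l, hl, rfl⟩ := List.mem_map.mp hls
    have := List.findIdx?_eq_none_iff.mp h l hl
    simpa [PySem.Str.isIn_eq] using this

-- ===== VERDICT (by name: the statements are the Claim_ definitions above) =====
theorem extract_pgp_public_key_spec : Claim_unchanged_extract_pgp_public_key := by
  intro content _ hnd
  unfold D_extract_pgp_public_key at hnd
  unfold extract_pgp_public_key extract_pgp_public_key_alt
  cases ha : PySem.Str.isIn "--BEGIN PGP PUBLIC KEY BLOCK--" content <;>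
    cases hb : PySem.Str.isIn "--END PGP PUBLIC KEY BLOCK--" content <;>
      cases hc : PySem.Str.isIn "\n" content <;>
        simp only [ha, hb, hc, Bool.not_true, Bool.not_false, Bool.or_false,
          Bool.or_self, Bool.or_true, Bool.false_eq_true, ite_true, ite_false]
  -- all three guards true
  have hA : PySem.Chars.isIn "--BEGIN PGP PUBLIC KEY BLOCK--".toList content.toList = true := by
    simpa [PySem.Str.isIn_eq] using ha
  have hB : PySem.Chars.isIn "--END PGP PUBLIC KEY BLOCK--".toList content.toList = true := by
    simpa [PySem.Str.isIn_eq] using hb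
  have hC : PySem.Chars.isIn ['\n'] content.toList = true := by
    simpa [PySem.Str.isIn_eq] using hc
  simp only [hA, hB, hC, true_and] at hnd
  set lines := (PySem.Str.split? content "\n").getD [] with hl
  set i := (lines.findIdx? (fun ln => PySem.Str.isIn "--BEGIN PGP PUBLIC KEY BLOCK--" ln)).getD lines.length with hi
  rw [pvExtractLoop_eq_located]
  simp only [← hi]
  cases hf : (lines.drop (i + 1)).findIdx? (fun ln => PySem.Str.isIn "--END PGP PUBLIC KEY BLOCK--" ln) with
  | none =>
    exact absurd ((pvD4_iff content).mpr (by rw [hl, hi] at hf; exact hf)) hnd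
  | some j =>
    have hjlt : j < (lines.drop (i + 1)).length := List.findIdx?_eq_some_iff_findIdx_eq.mp hf |>.1
    have hj1 : j + 1 < (lines.drop i).length := by
      have : lines.drop (i + 1) = (lines.drop i).drop 1 := by
        rw [List.drop_drop]
      rw [this, List.length_drop] at hjlt
      omega
    have := pvFound_join (lines.drop i) j hj1
    rw [List.drop_drop] at this
    simp only [Option.some.injEq]
    simpa using this

theorem extract_pgp_public_key_changed : Claim_changed_extract_pgp_public_key := by
  unfold Claim_changed_extract_pgp_public_key; decide

theorem extract_pgp_public_key_tight : Claim_exact_extract_pgp_public_key := by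
  intro content _ hd
  obtain ⟨hA, hB, hC, h4⟩ := hd
  have ha : PySem.Str.isIn "--BEGIN PGP PUBLIC KEY BLOCK--" content = true := by
    simpa [PySem.Str.isIn_eq] using hA
  have hb : PySem.Str.isIn "--END PGP PUBLIC KEY BLOCK--" content = true := by
    simpa [PySem.Str.isIn_eq] using hB
  have hc : PySem.Str.isIn "\n" content = true := by
    simpa [PySem.Str.isIn_eq] using hC
  have hf := (pvD4_iff content).mp h4
  unfold extract_pgp_public_key extract_pgp_public_key_alt
  simp only [ha, hb, hc, Bool.not_true, Bool.or_self, Bool.false_eq_true, ite_false]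
  intro hcontra
  rw [hf] at hcontra
  simp at hcontra
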